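-- pv_equiv track=rewrite | github.com/qchempku2017/MatLLMSearch | oracle/utils/data_processing.py | correct_brackets
-- ===== SOURCE A (Python) =====
-- def correct_brackets(s: str) -> str:
--     """Correct mismatched brackets in string."""
--     stack, result = [], []
--     in_quotes, escape = False, False
--
--     for char in s:
--         if not in_quotes:
--             if char in '{[':
--                 stack.append(char)
--                 result.append(char)
--             elif char in '}]':
--                 if stack:
--                     expected = '}' if stack[-1] == '{' else ']'
--                     result.append(expected if char != expected else char)
--                     stack.pop()
--             elif char == '"':
--                 in_quotes = True
--                 result.append(char)
--             else:
--                 result.append(char)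
--         else:
--             if char == '"' and not escape:
--                 in_quotes = False
--             elif char == '\\' and not escape:
--                 escape = True
--             else:
--                 escape = False
--             result.append(char)
--
--     while stack:
--         result.append('}' if stack.pop() == '{' else ']')
--
--     return ''.join(result)
-- ===== SOURCE B (Python) =====
-- def correct_brackets(s: str) -> str:
--     """Correct mismatched brackets in string (two-pass: quote mask, then bracket repair)."""
--     # Pass 1: for each character, record whether it is seen outside quotes.
--     mask = []
--     in_quotes, escape = False, False
--     for ch in s:
--         mask.append(not in_quotes)
--         if not in_quotes:
--             if ch == '"':
--                 in_quotes = True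
--         elif ch == '"' and not escape:
--             in_quotes = False
--         elif ch == '\\' and not escape:
--             escape = True
--         else:
--             escape = False
--     # Pass 2: bracket repair driven by the mask.
--     stack, out = [], []
--     for ch, outside in zip(s, mask):
--         if outside and ch in '{[':
--             stack.append(ch)
--             out.append(ch)
--         elif outside and ch in '}]':
--             if stack:
--                 out.append('}' if stack.pop() == '{' else ']')
--         else:
--             out.append(ch)
--     out.extend('}' if b == '{' else ']' for b in reversed(stack))
--     return ''.join(out)
-- ===== Notes on version B (the rewrite author's own statement) =====
-- stated objective: alternative
-- what changed: Split A's single interleaved loop into two passes: a first pass runs only the quote/escape state machine to build a boolean outside-quotes mask, and a second pass applies the bracket-stack repair to the characters zipped with that mask.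
import Mathlib
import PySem

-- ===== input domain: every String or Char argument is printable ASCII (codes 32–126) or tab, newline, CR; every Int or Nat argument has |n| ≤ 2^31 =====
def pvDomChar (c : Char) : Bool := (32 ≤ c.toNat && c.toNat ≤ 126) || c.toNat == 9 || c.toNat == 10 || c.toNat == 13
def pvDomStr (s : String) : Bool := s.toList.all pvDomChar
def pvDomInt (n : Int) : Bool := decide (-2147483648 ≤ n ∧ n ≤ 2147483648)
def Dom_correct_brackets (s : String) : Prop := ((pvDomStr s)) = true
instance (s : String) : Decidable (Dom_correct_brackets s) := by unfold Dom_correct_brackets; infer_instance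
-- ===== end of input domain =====

-- B replaces A's single interleaved loop by two passes (quote mask, then bracket repair); alternative decomposition, same cost.

-- ===== PORT A =====
-- 'while stack: result.append(closer(stack.pop()))' : pops from the end, so it emits the closers of stack reversed.
def cbFlush (stack : List Char) : List Char :=
  stack.reverse.map (fun c => if c = '{' then '}' else ']')

-- the for-loop of A: state (stack, result, in_quotes, escape)
def cbAloop : List Char → List Char × List Char × Bool × Bool → List Char × List Char × Bool × Bool
  | [], st => st
  | c :: cs, (stack, result, inq, esc) =>
    if !inq then
      if c = '{' ∨ c = '[' then cbAloop cs (stack ++ [c], result ++ [c], inq, esc)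
      else if c = '}' ∨ c = ']' then
        match stack.getLast? with
        | some top =>
          let expected := if top = '{' then '}' else ']'
          cbAloop cs (stack.dropLast, result ++ [if c ≠ expected then expected else c], inq, esc)
        | none => cbAloop cs (stack, result, inq, esc)
      else if c = '"' then cbAloop cs (stack, result ++ [c], true, esc)
      else cbAloop cs (stack, result ++ [c], inq, esc)
    else
      if c = '"' ∧ !esc then cbAloop cs (stack, result ++ [c], false, esc)
      else if c = '\\' ∧ !esc then cbAloop cs (stack, result ++ [c], inq, true)
      else cbAloop cs (stack, result ++ [c], inq, false)

def correct_brackets (s : String) : String :=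
  let (stack, result, _, _) := cbAloop s.toList ([], [], false, false)
  String.ofList (result ++ cbFlush stack)

-- ===== PORT B =====
-- pass 1: the quote/escape state machine alone, emitting the outside-quotes mask
def cbMask : List Char → Bool → Bool → List Bool
  | [], _, _ => []
  | c :: cs, inq, esc =>
    (!inq) ::
      (if !inq then cbMask cs (if c = '"' then true else inq) esc
       else if c = '"' ∧ !esc then cbMask cs false esc
       else if c = '\\' ∧ !esc then cbMask cs inq true
       else cbMask cs inq false)

-- pass 2: bracket repair over characters zipped with the mask, then flush the stack
def cbPass2 : List (Char × Bool) → List Char → List Char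
  | [], stack => stack.reverse.map (fun b => if b = '{' then '}' else ']')
  | (c, outside) :: rest, stack =>
    if outside ∧ (c = '{' ∨ c = '[') then c :: cbPass2 rest (stack ++ [c])
    else if outside ∧ (c = '}' ∨ c = ']') then
      match stack.getLast? with
      | some top => (if top = '{' then '}' else ']') :: cbPass2 rest stack.dropLast
      | none => cbPass2 rest stack
    else c :: cbPass2 rest stack

def correct_brackets_alt (s : String) : String :=
  String.ofList (cbPass2 (s.toList.zip (cbMask s.toList false false)) [])

-- ===== PRECONDITION & SPEC =====
def Spec_correct_brackets (s : String) (out : String) : Prop := out = correct_brackets_alt s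
instance (s : String) (out : String) : Decidable (Spec_correct_brackets s out) := by unfold Spec_correct_brackets; infer_instance

-- ===== CLAIM (what is proved, stated in full; the proofs are below) =====
def Claim_equal_correct_brackets : Prop := ∀ (s : String), Dom_correct_brackets s → Spec_correct_brackets s (correct_brackets s)

-- ===== LEMMAS AND PROOFS =====
theorem cb_main : ∀ (cs stack result : List Char) (inq esc : Bool),
    (cbAloop cs (stack, result, inq, esc)).2.1 ++ cbFlush (cbAloop cs (stack, result, inq, esc)).1
      = result ++ cbPass2 (cs.zip (cbMask cs inq esc)) stack := by
  intro cs
  induction cs with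
  | nil => intro stack result inq esc; simp [cbAloop, cbMask, cbPass2, cbFlush]
  | cons c cs ih =>
    intro stack result inq esc
    cases inq with
    | true =>
      by_cases h1 : c = '"' ∧ esc = false
      · simp [cbAloop, cbMask, cbPass2, h1, ih]
      · by_cases h2 : c = '\\' ∧ esc = false
        · simp [cbAloop, cbMask, cbPass2, h2, ih]
        · simp [cbAloop, cbMask, cbPass2, h1, h2, ih]
    | false =>
      by_cases hb : c = '{' ∨ c = '['
      · have hne : ¬ (c = '}' ∨ c = ']') := by rcases hb with h | h <;> subst h <;> decide
        have hq : ¬ c = '"' := by rcases hb with h | h <;> subst h <;> decide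
        simp [cbAloop, cbMask, cbPass2, hb, hq, ih]
      · by_cases hc : c = '}' ∨ c = ']'
        · have hq : ¬ c = '"' := by rcases hc with h | h <;> subst h <;> decide
          cases hst : stack.getLast? with
          | some top =>
            have hexp : (if c ≠ (if top = '{' then '}' else ']') then (if top = '{' then '}' else ']') else c)
                = (if top = '{' then '}' else ']') := by split_ifs <;> simp_all
            simp [cbAloop, cbMask, cbPass2, hb, hc, hq, hst, hexp, ih]
          | none => simp [cbAloop, cbMask, cbPass2, hb, hc, hq, hst, ih]
        · by_cases hq : c = '"'
          · simp [cbAloop, cbMask, cbPass2, hq, ih]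
          · simp [cbAloop, cbMask, cbPass2, hb, hc, hq, ih]

-- ===== VERDICT (by name: the statement is the Claim_ definition above) =====
theorem correct_brackets_spec : Claim_equal_correct_brackets := by
  intro s _
  unfold Spec_correct_brackets correct_brackets correct_brackets_alt
  have h := cb_main s.toList [] [] false false
  rcases hst : cbAloop s.toList ([], [], false, false) with ⟨st, ⟨res, a, b⟩⟩
  rw [hst] at h
  simpa using congrArg String.ofList h
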